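-- pv_equiv track=rewrite | github.com/JovinRyan/delafossite_cwgnn | delafossite_cwgnn/graph_construction/include.py | count_orbital_fill
-- ===== SOURCE A (Python) =====
-- def count_orbital_fill(electrons: int, num_orbitals: int):
--     orbitals = [0] * num_orbitals
--
--     # First pass: add 1 electron per orbital (Hund's rule)
--     for i in range(min(electrons, num_orbitals)):
--         orbitals[i] += 1
--
--     remaining = electrons - num_orbitals
--
--     # Second pass: pair up electrons
--     for i in range(num_orbitals):
--         if remaining <= 0:
--             break
--         if orbitals[i] == 1:
--             orbitals[i] += 1
--             remaining -= 1
--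
--     full = sum(1 for e in orbitals if e == 2)
--     partial = sum(1 for e in orbitals if e == 1)
--     unfilled = sum(1 for e in orbitals if e == 0)
--
--     return unfilled, partial, full
-- ===== SOURCE B (Python) =====
-- def count_orbital_fill(electrons: int, num_orbitals: int):
--     # Closed-form: no orbital array, O(1) arithmetic.
--     n = max(num_orbitals, 0)
--     singles = min(max(electrons, 0), n)              # orbitals given one electron
--     pairs = min(max(electrons - num_orbitals, 0), singles)  # orbitals paired up
--     return n - singles, singles - pairs, pairs
-- ===== Notes on version B (the rewrite author's own statement) =====
-- stated objective: faster
-- what changed: B replaces A's orbital array and two filling loops with closed-form min/max arithmetic computing full/partial/unfilled counts directly.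
import Mathlib
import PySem

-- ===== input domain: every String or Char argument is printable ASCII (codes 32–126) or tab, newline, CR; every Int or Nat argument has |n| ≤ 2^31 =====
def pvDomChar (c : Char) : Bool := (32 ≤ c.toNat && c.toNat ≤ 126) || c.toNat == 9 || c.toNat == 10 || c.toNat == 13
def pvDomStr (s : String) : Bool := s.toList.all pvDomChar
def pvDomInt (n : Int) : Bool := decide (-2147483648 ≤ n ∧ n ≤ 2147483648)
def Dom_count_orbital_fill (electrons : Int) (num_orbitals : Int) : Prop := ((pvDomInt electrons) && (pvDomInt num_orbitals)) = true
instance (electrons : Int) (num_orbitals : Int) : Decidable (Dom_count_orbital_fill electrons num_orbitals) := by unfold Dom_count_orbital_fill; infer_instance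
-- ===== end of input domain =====

-- B replaces A's orbital array and two filling loops with closed-form min/max arithmetic (objective: faster, O(1) vs O(n)).

-- ===== PORT A =====
-- first pass: for i in range(min(electrons, num_orbitals)): orbitals[i] += 1
-- (every index visited is in range, so List.set/getD are exact here)
def cofA_pass1 (orbitals : List Int) (m : Int) : List Int :=
  (PySem.List.pyRange 0 m 1).foldl (fun acc i => acc.set i.toNat (acc.getD i.toNat 0 + 1)) orbitals

-- second pass: for i in range(num_orbitals): if remaining <= 0: break; if orbitals[i] == 1: orbitals[i] += 1; remaining -= 1
def cofA_pass2 : List Int → Int → List Int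
  | [], _ => []
  | x :: xs, rem =>
    if rem ≤ 0 then x :: xs
    else if x == 1 then (x + 1) :: cofA_pass2 xs (rem - 1)
    else x :: cofA_pass2 xs rem

def count_orbital_fill (electrons : Int) (num_orbitals : Int) : List Int :=
  let orbitals0 := List.replicate num_orbitals.toNat (0 : Int)
  let orbitals1 := cofA_pass1 orbitals0 (min electrons num_orbitals)
  let remaining := electrons - num_orbitals
  let orbitals := cofA_pass2 orbitals1 remaining
  let full : Int := (orbitals.filter (fun e => e == 2)).length
  let partial_ : Int := (orbitals.filter (fun e => e == 1)).length
  let unfilled : Int := (orbitals.filter (fun e => e == 0)).length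
  [unfilled, partial_, full]

-- ===== PORT B =====
def count_orbital_fill_alt (electrons : Int) (num_orbitals : Int) : List Int :=
  let n := max num_orbitals 0
  let singles := min (max electrons 0) n
  let pairs := min (max (electrons - num_orbitals) 0) singles
  [n - singles, singles - pairs, pairs]

-- ===== PRECONDITION & SPEC =====
def Spec_count_orbital_fill (electrons : Int) (num_orbitals : Int) (out : List Int) : Prop := out = count_orbital_fill_alt electrons num_orbitals
instance (electrons : Int) (num_orbitals : Int) (out : List Int) : Decidable (Spec_count_orbital_fill electrons num_orbitals out) := by unfold Spec_count_orbital_fill; infer_instance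

-- ===== CLAIM (what is proved, stated in full; the proofs are below) =====
def Claim_equal_count_orbital_fill : Prop := ∀ (electrons : Int) (num_orbitals : Int), Dom_count_orbital_fill electrons num_orbitals → Spec_count_orbital_fill electrons num_orbitals (count_orbital_fill electrons num_orbitals)

-- ===== LEMMAS AND PROOFS =====

-- shape of the array after the first pass
theorem cofA_pass1_shape (m : Int) :
    ∀ (k : Nat), m.toNat ≤ k →
      cofA_pass1 (List.replicate k (0 : Int)) m =
        List.replicate m.toNat 1 ++ List.replicate (k - m.toNat) 0 := by
  unfold cofA_pass1
  rw [PySem.List.pyRange_one]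
  simp only [sub_zero, zero_add]
  induction m.toNat with
  | zero => intro k _; simp
  | succ a ih =>
    intro k hk
    rw [List.range_succ]
    simp only [List.map_append, List.foldl_append, List.map_cons, List.map_nil, List.foldl_cons,
      List.foldl_nil]
    rw [ih k (by omega)]
    have ha : (a : Int).toNat = a := by omega
    rw [ha]
    have hgd : (List.replicate a (1 : Int) ++ List.replicate (k - a) 0).getD a 0 = 0 := by
      rw [List.getD_eq_getElem?_getD, List.getElem?_append_right (by simp)]
      simp only [List.length_replicate, Nat.sub_self, List.getElem?_replicate]
      have : 0 < k - a := by omega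
      simp [this]
    rw [hgd]
    have hset : (List.replicate a (1 : Int) ++ List.replicate (k - a) 0).set a (0 + 1) =
        List.replicate (a + 1) 1 ++ List.replicate (k - (a + 1)) 0 := by
      rw [show k - a = (k - (a + 1)) + 1 from by omega, List.replicate_succ, List.set_append]
      simp [List.replicate_succ']
    rw [hset]

-- pairing leaves zeros alone
theorem cofA_pass2_zeros (t : Nat) (r : Int) :
    cofA_pass2 (List.replicate t (0 : Int)) r = List.replicate t 0 := by
  induction t generalizing r with
  | zero => simp [cofA_pass2]
  | succ t ih =>
    rw [List.replicate_succ]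
    unfold cofA_pass2
    split_ifs with h h2
    · rfl
    · exact absurd h2 (by decide)
    · simp [ih]

-- shape of the array after the second pass
theorem cofA_pass2_shape (s : Nat) :
    ∀ (t : Nat) (r : Int),
      cofA_pass2 (List.replicate s (1 : Int) ++ List.replicate t 0) r =
        List.replicate (min r.toNat s) 2 ++ List.replicate (s - min r.toNat s) 1 ++
          List.replicate t 0 := by
  induction s with
  | zero =>
    intro t r
    simp [cofA_pass2_zeros]
  | succ s ih =>
    intro t r
    rw [List.replicate_succ, List.cons_append]
    unfold cofA_pass2
    split_ifs with h h2
    · have : r.toNat = 0 := by omega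
      simp [this, List.replicate_succ]
    · rw [ih t (r - 1)]
      have h1 : min r.toNat (s + 1) = min (r - 1).toNat s + 1 := by omega
      rw [h1]
      have h2' : s + 1 - (min (r - 1).toNat s + 1) = s - min (r - 1).toNat s := by omega
      rw [h2', List.replicate_succ]
      norm_num
    · exact absurd (by decide) h2

theorem count_orbital_fill_spec : Claim_equal_count_orbital_fill := by
  intro e n _
  unfold Spec_count_orbital_fill
  have hm : (min e n).toNat ≤ n.toNat := by omega
  simp only [count_orbital_fill, count_orbital_fill_alt]
  rw [cofA_pass1_shape (min e n) n.toNat hm, cofA_pass2_shape]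
  simp only [List.filter_append, List.filter_replicate, List.length_append]
  norm_num
  refine ⟨by omega, by omega, by omega⟩
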